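-- pv_equiv track=rewrite | github.com/natejenson/AdventOfCode2016 | Day 1/day1.py | GetPointsOnPath
-- ===== SOURCE A (Python) =====
-- def GetPointsOnPath(startX, startY, heading, distance):
--     if (heading == 0):
--         return [(startX, step) for step in range(startY+1,startY+distance+1)]
--     elif (heading == 1):
--         return [(step, startY) for step in range(startX+1,startX+distance+1)]
--     elif (heading == 2):
--         return [(startX, step) for step in range(startY-1,startY-distance-1,-1)]
--     elif (heading == 3):
--         return [(step, startY) for step in range(startX-1,startX-distance-1,-1)]
-- ===== SOURCE B (Python) =====
-- def GetPointsOnPath(startX, startY, heading, distance):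
--     if heading not in (0, 1, 2, 3):
--         return None
--     sign = 1 - 2 * (heading // 2)      # +1 for headings 0,1 ; -1 for 2,3
--     pts = []
--     step = distance
--     while step >= 1:                   # walk the path from its far end back to the start
--         if heading % 2 == 0:
--             pts.append((startX, startY + sign * step))
--         else:
--             pts.append((startX + sign * step, startY))
--         step -= 1
--     pts.reverse()
--     return pts
-- ===== Notes on version B (the rewrite author's own statement) =====
-- stated objective: alternative
-- what changed: Instead of four per-heading range comprehensions, B derives the axis and sign arithmetically from the heading (heading%2, 1-2*(heading//2)) and builds the point list back-to-front with a countdown while-loop from step=distance to 1, reversing once at the end.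
-- outside the precondition, e.g. on GetPointsOnPath(0, 0, 4, 2): A returns None, B returns None
import Mathlib
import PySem

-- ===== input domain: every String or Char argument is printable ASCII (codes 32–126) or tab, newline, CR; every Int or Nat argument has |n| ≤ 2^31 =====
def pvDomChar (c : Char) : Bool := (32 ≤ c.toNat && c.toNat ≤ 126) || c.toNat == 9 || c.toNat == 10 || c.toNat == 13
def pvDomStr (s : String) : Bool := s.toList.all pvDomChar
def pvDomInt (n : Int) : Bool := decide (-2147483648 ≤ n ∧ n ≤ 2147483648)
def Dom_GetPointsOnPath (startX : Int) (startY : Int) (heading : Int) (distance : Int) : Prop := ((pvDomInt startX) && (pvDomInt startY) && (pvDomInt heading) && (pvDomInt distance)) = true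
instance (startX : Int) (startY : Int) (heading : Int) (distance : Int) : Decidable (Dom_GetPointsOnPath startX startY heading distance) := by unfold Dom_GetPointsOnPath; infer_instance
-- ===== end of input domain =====

-- B derives axis and sign arithmetically from the heading and builds the point list back-to-front
-- with a countdown loop, reversing once at the end; objective: alternative decomposition.


-- ===== PORT A =====
def GetPointsOnPath (startX : Int) (startY : Int) (heading : Int) (distance : Int) : List (Int × Int) :=
  if heading == 0 then
    (PySem.List.pyRange (startY + 1) (startY + distance + 1) 1).map (fun step => (startX, step))
  else if heading == 1 then
    (PySem.List.pyRange (startX + 1) (startX + distance + 1) 1).map (fun step => (step, startY))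
  else if heading == 2 then
    (PySem.List.pyRange (startY - 1) (startY - distance - 1) (-1)).map (fun step => (startX, step))
  else if heading == 3 then
    (PySem.List.pyRange (startX - 1) (startX - distance - 1) (-1)).map (fun step => (step, startY))
  else []  -- Python A falls through and returns None here; excluded by Pre_

-- ===== PORT B =====
-- the countdown while-loop of Source B: append the point for 'step', then step -= 1
def pvBLoop (startX startY sign : Int) (vert : Bool) (step : Int) (acc : List (Int × Int)) :
    List (Int × Int) :=
  if 1 ≤ step then
    pvBLoop startX startY sign vert (step - 1)
      (acc ++ [if vert then (startX, startY + sign * step) else (startX + sign * step, startY)])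
  else acc
termination_by step.toNat
decreasing_by omega

def GetPointsOnPath_alt (startX : Int) (startY : Int) (heading : Int) (distance : Int) :
    List (Int × Int) :=
  if heading == 0 || heading == 1 || heading == 2 || heading == 3 then
    let sign : Int := 1 - 2 * PySem.Int.floordiv heading 2
    let vert : Bool := PySem.Int.mod heading 2 == 0
    (pvBLoop startX startY sign vert distance []).reverse
  else []  -- Python B returns None here; excluded by Pre_

-- ===== PRECONDITION & SPEC =====
-- Pre_ excludes headings outside {0,1,2,3}: there Python A falls off the end and returns None,
-- which is not a value of the declared list type (B returns None there too).
def Pre_GetPointsOnPath (startX : Int) (startY : Int) (heading : Int) (distance : Int) : Prop :=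
  heading = 0 ∨ heading = 1 ∨ heading = 2 ∨ heading = 3
instance (startX : Int) (startY : Int) (heading : Int) (distance : Int) : Decidable (Pre_GetPointsOnPath startX startY heading distance) := by unfold Pre_GetPointsOnPath; infer_instance
def pvWitness_GetPointsOnPath : Int × Int × Int × Int := (1, 2, 0, 3)

def Spec_GetPointsOnPath (startX : Int) (startY : Int) (heading : Int) (distance : Int) (out : List (Int × Int)) : Prop := out = GetPointsOnPath_alt startX startY heading distance
instance (startX : Int) (startY : Int) (heading : Int) (distance : Int) (out : List (Int × Int)) : Decidable (Spec_GetPointsOnPath startX startY heading distance out) := by unfold Spec_GetPointsOnPath; infer_instance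

-- ===== CLAIM =====
def Claim_equal_GetPointsOnPath : Prop := ∀ (startX : Int) (startY : Int) (heading : Int) (distance : Int), Dom_GetPointsOnPath startX startY heading distance → Pre_GetPointsOnPath startX startY heading distance → Spec_GetPointsOnPath startX startY heading distance (GetPointsOnPath startX startY heading distance)

-- ===== LEMMAS AND PROOFS =====

-- the countdown loop produces the points for steps step, step-1, …, 1, i.e. the ascending list reversed
theorem pvBLoop_eq (sx sy sign : Int) (vert : Bool) :
    ∀ (step : Int) (acc : List (Int × Int)),
      pvBLoop sx sy sign vert step acc =
        acc ++ ((PySem.List.pyRange 1 (step + 1) 1).map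
          (fun s => if vert then (sx, sy + sign * s) else (sx + sign * s, sy))).reverse := by
  intro step acc
  induction step, acc using pvBLoop.induct sx sy sign vert with
  | case1 step acc h ih =>
      simp only [dite_eq_ite] at ih
      rw [pvBLoop, if_pos h, ih]
      rw [show step + 1 = (step - 1 + 1) + 1 by ring,
        PySem.List.pyRange_one_succ_right (by omega : (1:Int) ≤ step - 1 + 1)]
      simp [List.map_append]
  | case2 step acc h =>
      rw [pvBLoop, if_neg h, PySem.List.pyRange_one_eq_nil (by omega)]
      simp

-- reindex an ascending Python range to range(1, d+1)
theorem pv_rng_asc (a d : Int) (f g : Int → Int × Int) (h : ∀ k : Int, f (a + k) = g (1 + k)) :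
    (PySem.List.pyRange a (a + d) 1).map f = (PySem.List.pyRange 1 (d + 1) 1).map g := by
  rw [PySem.List.pyRange_one, PySem.List.pyRange_one, List.map_map, List.map_map]
  rw [show a + d - a = d + 1 - 1 by ring]
  apply List.map_congr_left
  intro k _
  simp only [Function.comp]
  exact h k

-- reindex a descending Python range to range(1, d+1)
theorem pv_rng_desc (a d : Int) (f g : Int → Int × Int) (h : ∀ k : Int, f (a - k) = g (1 + k)) :
    (PySem.List.pyRange a (a - d) (-1)).map f = (PySem.List.pyRange 1 (d + 1) 1).map g := by
  rw [PySem.List.pyRange_neg_one, PySem.List.pyRange_one, List.map_map, List.map_map]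
  rw [show a - (a - d) = d + 1 - 1 by ring]
  apply List.map_congr_left
  intro k _
  simp only [Function.comp]
  exact h k

-- ===== VERDICT =====
theorem GetPointsOnPath_spec : Claim_equal_GetPointsOnPath := by
  intro sx sy heading d _ hpre
  unfold Spec_GetPointsOnPath GetPointsOnPath GetPointsOnPath_alt
  rcases hpre with h | h | h | h <;> subst h <;>
    norm_num [PySem.Int.floordiv, PySem.Int.mod] <;>
    rw [pvBLoop_eq, List.nil_append, List.reverse_reverse]
  · rw [show sy + d + 1 = (sy + 1) + d by ring]
    exact pv_rng_asc (sy + 1) d _ _ (by intro k; simp; ring_nf)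
  · rw [show sx + d + 1 = (sx + 1) + d by ring]
    exact pv_rng_asc (sx + 1) d _ _ (by intro k; simp; ring_nf)
  · rw [show sy - d - 1 = (sy - 1) - d by ring]
    exact pv_rng_desc (sy - 1) d _ _ (by intro k; simp; ring_nf)
  · rw [show sx - d - 1 = (sx - 1) - d by ring]
    exact pv_rng_desc (sx - 1) d _ _ (by intro k; simp; ring_nf)
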